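-- pv_equiv track=rewrite | github.com/patrickwol/nowcoder | python/src/main/NC119.py | shiftUp
-- ===== SOURCE A (Python) =====
-- def shiftUp(q, v):
--     q.append(v)
--     if len(q) == 0:
--         return q
--     k = len(q) - 1
--     while k > 0:
--         if q[k] > q[(k - 1) // 2]:
--             q[k], q[(k - 1) // 2] = q[(k - 1) // 2], q[k]
--         else:
--             return q
--         k = (k - 1) // 2
--     return q
-- ===== SOURCE B (Python) =====
-- def shiftUp(q, v):
--     q.append(v)
--     # stage 1: the ancestor chain of the new leaf, immediate parent first
--     path, k = [], len(q) - 1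
--     while k > 0:
--         k = (k - 1) // 2
--         path.append(k)
--     # stage 2: how many ancestors v climbs past (the first parent >= v stops it)
--     climb = 0
--     while climb < len(path) and v > q[path[climb]]:
--         climb += 1
--     # stage 3: rebuild the list in one comprehension: each passed ancestor drops
--     # one level along the chain and v lands at the topmost passed ancestor
--     chain = [len(q) - 1] + path[:climb]
--     new = {chain[i]: q[chain[i + 1]] for i in range(climb)}
--     new[chain[climb]] = v
--     q[:] = [new.get(i, x) for i, x in enumerate(q)]
--     return q
-- ===== Notes on version B (the rewrite author's own statement) =====
-- stated objective: alternative
-- what changed: Replaces A's interleaved swap loop by three staged passes: first collect the ancestor index chain of the new leaf, then count how many ancestors v climbs past, then rebuild the whole list in one enumerate-comprehension from a dict of the shifted positions (no in-place swapping walk).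
import Mathlib
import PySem

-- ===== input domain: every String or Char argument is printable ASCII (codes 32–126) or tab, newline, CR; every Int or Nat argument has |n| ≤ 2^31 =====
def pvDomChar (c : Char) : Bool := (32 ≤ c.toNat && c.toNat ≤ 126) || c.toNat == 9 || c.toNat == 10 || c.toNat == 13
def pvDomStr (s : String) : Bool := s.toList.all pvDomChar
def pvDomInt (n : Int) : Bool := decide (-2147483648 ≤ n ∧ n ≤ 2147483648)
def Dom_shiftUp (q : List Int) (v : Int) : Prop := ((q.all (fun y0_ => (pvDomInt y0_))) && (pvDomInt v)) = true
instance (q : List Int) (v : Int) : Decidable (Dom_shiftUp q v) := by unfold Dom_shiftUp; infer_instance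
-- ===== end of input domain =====

-- B rebuilds the list in three staged passes (ancestor chain, climb count, one
-- enumerate-comprehension from a dict of shifted positions) instead of A's in-place
-- swap walk; equivalence is about the RETURN value (both Pythons also mutate q in
-- place to the same final content).

-- ===== PORT A =====
-- A's while-loop: k walks the parent chain, swapping q[k] with q[(k-1)//2] while greater.
def shiftUpLoopA (q : List Int) (k : Int) : List Int :=
  if hk : 0 < k then
    let p := PySem.Int.floordiv (k - 1) 2
    if q.getD k.toNat 0 > q.getD p.toNat 0 then
      shiftUpLoopA ((q.set k.toNat (q.getD p.toNat 0)).set p.toNat (q.getD k.toNat 0)) p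
    else q
  else q
termination_by k.toNat
decreasing_by
  have h := PySem.Int.floordiv_eq_ediv_of_pos (a := k - 1) (b := 2) (by omega)
  simp only [h]; omega

def shiftUp (q : List Int) (v : Int) : List Int :=
  let q1 := q ++ [v]
  if q1.length == 0 then q1
  else shiftUpLoopA q1 ((q1.length : Int) - 1)

-- ===== PORT B =====
-- stage 1: `path, k = [], len(q)-1; while k > 0: k = (k-1)//2; path.append(k)`
-- (the while loop accumulating the ancestor chain, immediate parent first)
def ancestors (k : Int) : List Int :=
  if hk : 0 < k then
    let p := PySem.Int.floordiv (k - 1) 2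
    p :: ancestors p
  else []
termination_by k.toNat
decreasing_by
  have h := PySem.Int.floordiv_eq_ediv_of_pos (a := k - 1) (b := 2) (by omega)
  simp only [h]; omega

-- stage 2: `climb = 0; while climb < len(path) and v > q[path[climb]]: climb += 1`
-- (the sequential scan of path, as structural recursion on the list it scans)
def climbCount (q : List Int) (v : Int) : List Int → Nat
  | [] => 0
  | p :: rest => if v > q.getD p.toNat 0 then climbCount q v rest + 1 else 0

-- stage 3 dict: `{chain[i]: q[chain[i+1]] for i in range(climb)}` then `new[chain[climb]] = v`
-- (chain has length climb+1; the pairs walk consecutive chain elements, last one maps to v;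
-- chain indices are pairwise distinct, so building the dict as its literal pair list is exact)
def mkNew (q : List Int) (v : Int) : List Int → List (Int × Int)
  | [] => []
  | [a] => [(a, v)]
  | a :: b :: rest => (a, q.getD b.toNat 0) :: mkNew q v (b :: rest)

def shiftUp_alt (q : List Int) (v : Int) : List Int :=
  let q1 := q ++ [v]
  let path := ancestors ((q1.length : Int) - 1)
  let c := climbCount q1 v path
  let chain := ((q1.length : Int) - 1) :: path.take c
  let d : PySem.Dict Int Int := PySem.Dict.mk (mkNew q1 v chain)
  -- `q[:] = [new.get(i, x) for i, x in enumerate(q)]`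
  (PySem.List.enumerate q1).map (fun ix => d.getD ix.1 ix.2)

-- ===== PRECONDITION & SPEC =====
def Spec_shiftUp (q : List Int) (v : Int) (out : List Int) : Prop := out = shiftUp_alt q v
instance (q : List Int) (v : Int) (out : List Int) : Decidable (Spec_shiftUp q v out) := by unfold Spec_shiftUp; infer_instance

-- ===== CLAIM (what is proved, stated in full; the proofs are below) =====
def Claim_equal_shiftUp : Prop := ∀ (q : List Int) (v : Int), Dom_shiftUp q v → Spec_shiftUp q v (shiftUp q v)

-- ===== LEMMAS AND PROOFS =====

-- Proof-side bridge: the classic hole-shift loop (value kept aside, parents shifted down).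
def holeLoop (q : List Int) (hole : Int) (value : Int) : List Int :=
  if hh : 0 < hole then
    let p := PySem.Int.floordiv (hole - 1) 2
    if value > q.getD p.toNat 0 then
      holeLoop (q.set hole.toNat (q.getD p.toNat 0)) p value
    else q.set hole.toNat value
  else q.set hole.toNat value
termination_by hole.toNat
decreasing_by
  have h := PySem.Int.floordiv_eq_ediv_of_pos (a := hole - 1) (b := 2) (by omega)
  simp only [h]; omega

-- A's list carries v at position k; the bridge keeps v aside: one A-step = one bridge step.
theorem loopA_eq_holeLoop : ∀ (n : Nat) (q : List Int) (v : Int) (k : Int),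
    k.toNat = n → 0 ≤ k → k.toNat < q.length →
    shiftUpLoopA (q.set k.toNat v) k = holeLoop q k v := by
  intro n
  induction n using Nat.strong_induction_on with
  | _ n ih =>
    intro q v k hn h0 hlen
    rw [shiftUpLoopA, holeLoop]
    by_cases hk : 0 < k
    · simp only [hk, dif_pos]
      have hp := PySem.Int.floordiv_eq_ediv_of_pos (a := k - 1) (b := 2) (by omega)
      have hp0 : 0 ≤ PySem.Int.floordiv (k - 1) 2 := by rw [hp]; omega
      have hpk : PySem.Int.floordiv (k - 1) 2 < k := by rw [hp]; omega
      have hgk : (q.set k.toNat v).getD k.toNat 0 = v := by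
        simp [List.getD, hlen]
      have hgp : (q.set k.toNat v).getD (PySem.Int.floordiv (k - 1) 2).toNat 0
          = q.getD (PySem.Int.floordiv (k - 1) 2).toNat 0 := by
        have hne' : k.toNat ≠ ((k - 1) / 2).toNat := by omega
        simp [List.getD, List.getElem?_set_ne hne']
      rw [hgk, hgp]
      by_cases hc : v > q.getD (PySem.Int.floordiv (k - 1) 2).toNat 0
      · simp only [hc, if_pos]
        rw [List.set_set]
        exact ih (PySem.Int.floordiv (k - 1) 2).toNat (by omega) _ v _ rfl hp0
          (by simpa using (by omega : (PySem.Int.floordiv (k - 1) 2).toNat < q.length))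
      · simp only [hc, if_neg, not_false_iff]
    · simp [hk]

theorem set_last_self (q : List Int) (v : Int) : (q ++ [v]).set q.length v = q ++ [v] := by
  induction q with
  | nil => simp
  | cons a t ih => simp [ih]

-- every ancestor index is in [0, k)
theorem ancestors_bounds : ∀ (n : Nat) (k : Int), k.toNat = n →
    ∀ x ∈ ancestors k, 0 ≤ x ∧ x < k := by
  intro n
  induction n using Nat.strong_induction_on with
  | _ n ih =>
    intro k hn x hx
    rw [ancestors] at hx
    by_cases hk : 0 < k
    · simp only [hk, dif_pos, List.mem_cons] at hx
      have hp := PySem.Int.floordiv_eq_ediv_of_pos (a := k - 1) (b := 2) (by omega)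
      rcases hx with h | h
      · subst h; rw [hp]; omega
      · have := ih (PySem.Int.floordiv (k - 1) 2).toNat (by rw [hp]; omega) _ rfl x h
        rw [hp] at this; omega
    · simp [hk] at hx

-- rebuild over the empty dict is the identity
theorem apply_mk_nil (q : List Int) :
    (PySem.List.enumerate q).map
      (fun ix => (PySem.Dict.mk ([] : List (Int × Int))).getD ix.1 ix.2) = q := by
  have : ∀ ix : Int × Int, (PySem.Dict.mk ([] : List (Int × Int))).getD ix.1 ix.2 = ix.2 := by
    intro ix
    rw [PySem.Dict.getD_eq_get?_getD]
    rfl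
  simp only [this]
  exact PySem.List.map_snd_enumerate q 0

-- peeling one dict entry off the rebuild = one List.set (key absent from the rest)
theorem apply_mk_cons (q : List Int) (k w : Int) (rest : List (Int × Int))
    (h0 : 0 ≤ k) (hrest : (PySem.Dict.mk rest).get? k = none) :
    (PySem.List.enumerate q).map
      (fun ix => (PySem.Dict.mk ((k, w) :: rest)).getD ix.1 ix.2)
    = (PySem.List.enumerate (q.set k.toNat w)).map
      (fun ix => (PySem.Dict.mk rest).getD ix.1 ix.2) := by
  apply List.ext_getElem
  · simp [PySem.List.length_enumerate]
  · intro j hj1 hj2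
    have hjq : j < q.length := by
      simpa [PySem.List.length_enumerate] using hj1
    have hjq2 : j < (q.set k.toNat w).length := by simpa using hjq
    rw [List.getElem_map, List.getElem_map, PySem.List.getElem_enumerate,
        PySem.List.getElem_enumerate]
    simp only [zero_add]
    rw [PySem.Dict.getD_eq_get?_getD, PySem.Dict.getD_eq_get?_getD,
        PySem.Dict.get?_mk_cons]
    by_cases hjk : (j : Int) = k
    · have hbeq : (k == (j : Int)) = true := by simp [hjk.symm]
      rw [hbeq, if_pos rfl, hjk, hrest]
      have hkj : k.toNat = j := by omega
      subst hkj
      simp [Option.getD_some, Option.getD_none, List.getElem_set_self]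
    · have hbeq : (k == (j : Int)) = false := by simp; omega
      rw [hbeq]
      have hset : (q.set k.toNat w)[j]'hjq2 = q[j]'hjq := by
        apply List.getElem_set_ne
        omega
      simp [hset]

-- climbCount only reads indices in path: a set at an index outside path changes nothing
theorem climbCount_set (q : List Int) (v w : Int) (k : Int) (hk : 0 ≤ k) :
    ∀ path : List Int, (∀ x ∈ path, 0 ≤ x ∧ x < k) →
    climbCount (q.set k.toNat w) v path = climbCount q v path := by
  intro path
  induction path with
  | nil => intro _; rfl
  | cons p rest ih =>
    intro hb
    have hp := hb p (by simp)
    have hne : p.toNat ≠ k.toNat := by omega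
    have : (q.set k.toNat w).getD p.toNat 0 = q.getD p.toNat 0 := by
      simp [List.getD, List.getElem?_set_ne (Ne.symm hne)]
    simp only [climbCount, this]
    rw [ih (fun x hx => hb x (by simp [hx]))]

-- mkNew only reads indices in the chain tail
theorem mkNew_set (q : List Int) (v w : Int) (k : Int) (hk : 0 ≤ k) :
    ∀ chain : List Int, (∀ x ∈ chain, 0 ≤ x ∧ x < k) →
    mkNew (q.set k.toNat w) v chain = mkNew q v chain := by
  intro chain
  induction chain with
  | nil => intro _; rfl
  | cons a rest ih =>
    intro hb
    cases rest with
    | nil => rfl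
    | cons b rest' =>
      have hbb := hb b (by simp)
      have hne : b.toNat ≠ k.toNat := by omega
      have : (q.set k.toNat w).getD b.toNat 0 = q.getD b.toNat 0 := by
        simp [List.getD, List.getElem?_set_ne (Ne.symm hne)]
      simp only [mkNew, this]
      rw [ih (fun x hx => hb x (by simp [hx]))]

-- keys of mkNew are chain elements
theorem mkNew_keys (q : List Int) (v : Int) :
    ∀ chain : List Int, ∀ p ∈ mkNew q v chain, p.1 ∈ chain := by
  intro chain
  induction chain with
  | nil => intro p hp; simp [mkNew] at hp
  | cons a rest ih =>
    intro p hp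
    cases rest with
    | nil =>
      simp [mkNew] at hp
      simp [hp]
    | cons b rest' =>
      simp only [mkNew, List.mem_cons] at hp
      rcases hp with h | h
      · simp [h]
      · have := ih p h
        simp [List.mem_cons] at this ⊢
        tauto

-- a key larger than every key of the pair list is not found
theorem get?_mk_none (k : Int) :
    ∀ l : List (Int × Int), (∀ p ∈ l, p.1 ≠ k) → (PySem.Dict.mk l).get? k = none := by
  intro l
  induction l with
  | nil => intro _; rfl
  | cons a rest ih =>
    intro h
    rw [PySem.Dict.get?_mk_cons]
    have ha := h a (by simp)
    have : (a.1 == k) = false := by simp [ha]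
    rw [this]
    exact ih (fun p hp => h p (by simp [hp]))

-- the hole-shift loop equals B's staged rebuild
theorem holeLoop_eq_rebuild : ∀ (n : Nat) (q : List Int) (v : Int) (k : Int),
    k.toNat = n → 0 ≤ k → k.toNat < q.length →
    holeLoop q k v
      = (PySem.List.enumerate q).map
          (fun ix => (PySem.Dict.mk (mkNew q v
              (k :: (ancestors k).take (climbCount q v (ancestors k))))).getD ix.1 ix.2) := by
  intro n
  induction n using Nat.strong_induction_on with
  | _ n ih =>
    intro q v k hn h0 hlen
    rw [holeLoop]
    by_cases hk : 0 < k
    · simp only [hk, dif_pos]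
      have hp := PySem.Int.floordiv_eq_ediv_of_pos (a := k - 1) (b := 2) (by omega)
      have hp0 : 0 ≤ PySem.Int.floordiv (k - 1) 2 := by rw [hp]; omega
      have hpk : PySem.Int.floordiv (k - 1) 2 < k := by rw [hp]; omega
      have hanc : ancestors k
          = PySem.Int.floordiv (k - 1) 2 :: ancestors (PySem.Int.floordiv (k - 1) 2) := by
        rw [ancestors]; simp only [hk, dif_pos]
      set p := PySem.Int.floordiv (k - 1) 2 with hpdef
      by_cases hc : v > q.getD p.toNat 0
      · -- climbing branch
        simp only [hc, if_pos]
        set c' := climbCount q v (ancestors p) with hc'def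
        have hclimb2 : climbCount q v (p :: ancestors p) = c' + 1 := by
          simp only [climbCount]; rw [if_pos hc]
        rw [hanc, hclimb2, List.take_succ_cons]
        have hmk : mkNew q v (k :: p :: (ancestors p).take c')
            = (k, q.getD p.toNat 0) :: mkNew q v (p :: (ancestors p).take c') := rfl
        rw [hmk]
        have hbounds : ∀ x ∈ p :: (ancestors p).take c', 0 ≤ x ∧ x < k := by
          intro x hx
          rcases List.mem_cons.mp hx with h | h
          · subst h; exact ⟨hp0, hpk⟩
          · have hx' := ancestors_bounds p.toNat p rfl x (List.mem_of_mem_take h)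
            exact ⟨hx'.1, lt_trans hx'.2 hpk⟩
        have hnone : (PySem.Dict.mk (mkNew q v (p :: (ancestors p).take c'))).get? k = none := by
          apply get?_mk_none
          intro pr hpr
          have := hbounds pr.1 (mkNew_keys q v _ pr hpr)
          omega
        rw [apply_mk_cons q k (q.getD p.toNat 0) _ h0 hnone]
        set q' := q.set k.toNat (q.getD p.toNat 0) with hq'def
        have hancb : ∀ x ∈ ancestors p, 0 ≤ x ∧ x < k := by
          intro x hx
          have hx' := ancestors_bounds p.toNat p rfl x hx
          exact ⟨hx'.1, lt_trans hx'.2 hpk⟩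
        have hclimb' : climbCount q' v (ancestors p) = c' := by
          rw [hq'def]; exact climbCount_set q v _ k h0 _ hancb
        have hmk' : mkNew q' v (p :: (ancestors p).take c')
            = mkNew q v (p :: (ancestors p).take c') := by
          rw [hq'def]; exact mkNew_set q v _ k h0 _ hbounds
        have hIH := ih p.toNat (by omega) q' v p rfl hp0
          (by rw [hq'def]; simpa using (by omega : p.toNat < q.length))
        rw [hIH, hclimb', hmk']
      · -- stopping branch: chain = [k], dict = [(k, v)]
        simp only [hc, if_neg, not_false_iff]
        have hclimb0 : climbCount q v (p :: ancestors p) = 0 := by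
          simp only [climbCount]; rw [if_neg hc]
        rw [hanc, hclimb0]
        simp only [List.take_zero]
        have : mkNew q v [k] = [(k, v)] := rfl
        rw [this, apply_mk_cons q k v [] h0 rfl, apply_mk_nil]
    · -- k = 0
      have hk0 : k = 0 := by omega
      subst hk0
      simp only [dif_neg (by omega : ¬ (0:Int) < 0)]
      have hanc : ancestors 0 = [] := by rw [ancestors]; simp
      rw [hanc]
      simp only [climbCount, List.take_nil]
      have : mkNew q v [(0:Int)] = [((0:Int), v)] := rfl
      rw [this, apply_mk_cons q 0 v [] le_rfl rfl, apply_mk_nil]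

-- ===== VERDICT (by name: the statement is the Claim_ definition above) =====
theorem shiftUp_spec : Claim_equal_shiftUp := by
  intro q v _
  show shiftUp q v = shiftUp_alt q v
  unfold shiftUp shiftUp_alt
  simp only [List.length_append, List.length_cons, List.length_nil]
  have hlen : ((q.length + 1 : Nat) : Int) - 1 = (q.length : Int) := by push_cast; ring
  rw [if_neg (by simp), hlen]
  have htoNat : ((q.length : Int)).toNat = q.length := by omega
  have hA := loopA_eq_holeLoop q.length (q ++ [v]) v (q.length : Int) (by simp) (by positivity)
    (by simp)
  have hset : ((q ++ [v]).set ((q.length : Int)).toNat v) = q ++ [v] := by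
    rw [htoNat]; exact set_last_self q v
  have hB := holeLoop_eq_rebuild q.length (q ++ [v]) v (q.length : Int) (by simp) (by positivity)
    (by simp)
  conv_lhs => rw [← hset]
  rw [hA]
  exact hB
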